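-- pv_equiv track=rewrite | github.com/akayunov/sc2 | minimapwatcher/minimapwatcher.py | parse_region
-- ===== SOURCE A (Python) =====
-- def parse_region(red_pixels_):
--     result = []
--     one_third_part = int(len(red_pixels_)/3)
--     two_third_part = int(len(red_pixels_)/3) * 2
--
--     for start_col in [0, one_third_part, two_third_part]:
--         for start_el in [0, one_third_part, two_third_part]:
--             qudrant_count = 0
--             for i in range(start_col, start_col + one_third_part):
--                 for k in range(start_el, start_el + one_third_part):
--                     qudrant_count += red_pixels_[i][k]
--             result.append(qudrant_count)
--     return result
-- ===== SOURCE B (Python) =====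
-- def parse_region(red_pixels_):
--     one_third = len(red_pixels_) // 3
--     size = 3 * one_third
--     result = [0] * 9
--     for i in range(size):
--         for k in range(size):
--             result[(i // one_third) * 3 + k // one_third] += red_pixels_[i][k]
--     return result
-- ===== Notes on version B (the rewrite author's own statement) =====
-- stated objective: alternative
-- what changed: Replaces A's nine separate per-quadrant region scans (4-deep nested loops driven by quadrant start offsets) with a single double loop over the whole 3t x 3t area that buckets each pixel into result[(i//t)*3 + k//t] by integer division of its indices.
import Mathlib
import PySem

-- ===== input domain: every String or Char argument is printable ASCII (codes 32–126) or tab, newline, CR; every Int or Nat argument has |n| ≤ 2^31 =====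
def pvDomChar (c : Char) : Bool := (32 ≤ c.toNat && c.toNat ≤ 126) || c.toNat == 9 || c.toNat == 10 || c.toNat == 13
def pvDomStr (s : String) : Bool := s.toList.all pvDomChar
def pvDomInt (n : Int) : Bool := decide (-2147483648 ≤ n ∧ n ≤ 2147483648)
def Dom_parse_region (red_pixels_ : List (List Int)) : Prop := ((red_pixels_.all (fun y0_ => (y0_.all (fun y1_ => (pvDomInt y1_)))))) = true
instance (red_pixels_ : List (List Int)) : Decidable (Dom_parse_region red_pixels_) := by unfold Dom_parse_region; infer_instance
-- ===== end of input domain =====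

-- B replaces A's nine separate per-quadrant region scans with one pass over the whole
-- 3t×3t area, bucketing each pixel into result[(i//t)*3 + k//t]; same cost, different decomposition.

-- red_pixels_[i][k]; Python raises IndexError out of range, which Pre_ excludes
def pvPix (red_pixels_ : List (List Int)) (i k : Int) : Int :=
  PySem.List.pyGetD (PySem.List.pyGetD red_pixels_ i []) k 0

-- ===== PORT A =====
def parse_region (red_pixels_ : List (List Int)) : List Int :=
  let one_third_part : Int := (red_pixels_.length : Int) / 3
  let two_third_part : Int := (red_pixels_.length : Int) / 3 * 2
  [(0 : Int), one_third_part, two_third_part].foldl (fun result start_col =>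
    [(0 : Int), one_third_part, two_third_part].foldl (fun result start_el =>
      result ++ [(PySem.List.pyRange start_col (start_col + one_third_part) 1).foldl (fun q i =>
        (PySem.List.pyRange start_el (start_el + one_third_part) 1).foldl (fun q k =>
          q + pvPix red_pixels_ i k) q) 0]) result) []

-- ===== PORT B =====
def parse_region_alt (red_pixels_ : List (List Int)) : List Int :=
  let one_third : Nat := red_pixels_.length / 3
  let size : Nat := 3 * one_third
  (List.range size).foldl (fun result i =>
    (List.range size).foldl (fun result k =>
      result.modify ((i / one_third) * 3 + k / one_third)
        (fun x => x + pvPix red_pixels_ (i : Int) (k : Int))) result)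
    (List.replicate 9 0)

-- ===== PRECONDITION & SPEC =====
-- Pre_ excludes ragged inputs on which Python A raises IndexError: every row the scan
-- visits (the first 3*(len//3) rows) must have at least 3*(len//3) entries.
def Pre_parse_region (red_pixels_ : List (List Int)) : Prop :=
  ∀ row ∈ red_pixels_.take (3 * (red_pixels_.length / 3)),
    3 * (red_pixels_.length / 3) ≤ row.length
instance (red_pixels_ : List (List Int)) : Decidable (Pre_parse_region red_pixels_) := by
  unfold Pre_parse_region; infer_instance

def pvWitness_parse_region : List (List Int) := [[1,2,3],[4,5,6],[7,8,9]]

def Spec_parse_region (red_pixels_ : List (List Int)) (out : List Int) : Prop := out = parse_region_alt red_pixels_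
instance (red_pixels_ : List (List Int)) (out : List Int) : Decidable (Spec_parse_region red_pixels_ out) := by unfold Spec_parse_region; infer_instance

-- ===== CLAIM (what is proved, stated in full; the proofs are below) =====
def Claim_equal_parse_region : Prop := ∀ (red_pixels_ : List (List Int)), Dom_parse_region red_pixels_ → Pre_parse_region red_pixels_ → Spec_parse_region red_pixels_ (parse_region red_pixels_)

-- ===== LEMMAS AND PROOFS =====

-- the sum A computes for quadrant (row block r, column block c); t = len // 3
def pvQuad (red_pixels_ : List (List Int)) (r c : Nat) : Int :=
  let t := red_pixels_.length / 3
  ((List.range t).map (fun a =>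
    ((List.range t).map (fun b => pvPix red_pixels_ ((r*t+a : Nat) : Int) ((c*t+b : Nat) : Int))).sum)).sum

-- B's elementary update step, on (bucket, value) pairs
def pvStep (r : List Int) (p : Nat × Int) : List Int := r.modify p.1 (fun x => x + p.2)

-- the stream of (bucket, value) pairs B traverses
def pvPairs (red_pixels_ : List (List Int)) : List (Nat × Int) :=
  let t := red_pixels_.length / 3
  (List.range (3*t)).flatMap (fun i =>
    (List.range (3*t)).map (fun k => ((i / t) * 3 + k / t, pvPix red_pixels_ (i : Int) (k : Int))))

theorem pvDivBlock {t a x : Nat} (hx : x ∈ List.range' (a*t) t) : x / t = a := by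
  rw [List.mem_range'_1] at hx
  have h1 : (a+1)*t = a*t + t := by ring
  exact Nat.div_eq_of_lt_le (by omega) (by omega)

theorem pvSumFilterFlat (l : List Nat) (f : Nat → List (Nat × Int)) (p : Nat × Int → Bool) :
    (((l.flatMap f).filter p).map Prod.snd).sum
      = (l.map (fun i => (((f i).filter p).map Prod.snd).sum)).sum := by
  induction l with
  | nil => simp
  | cons a l ih => simp [List.flatMap_cons, List.filter_append, ih]

theorem pvKblock (v : Nat → Int) (t a b r c : Nat) (hb : b < 3) (hc : c < 3) :
    ((((List.range' (b*t) t).map (fun k => (a*3 + k/t, v k))).filter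
        (fun p => p.1 == r*3 + c)).map Prod.snd).sum
      = if a = r ∧ b = c then ((List.range' (c*t) t).map v).sum else 0 := by
  have hmap : (List.range' (b*t) t).map (fun k => (a*3 + k/t, v k))
      = (List.range' (b*t) t).map (fun k => (a*3 + b, v k)) :=
    List.map_congr_left (fun x hx => by rw [pvDivBlock hx])
  rw [hmap, List.filter_map]
  by_cases h : a*3 + b = r*3 + c
  · obtain ⟨rfl, rfl⟩ : a = r ∧ b = c := by omega
    simp [Function.comp_def]
  · have hbc : ¬(a = r ∧ b = c) := by omega
    simp only [Function.comp_def]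
    rw [List.filter_congr (fun x _ => (show ((a*3+b, v x).1 == r*3+c) = false from by simp [h]))]
    simp [hbc]

theorem pvRange_three (t : Nat) :
    List.range (3*t) = List.range' 0 t ++ List.range' t t ++ List.range' (2*t) t := by
  rw [List.range_eq_range']
  rw [show 3*t = t+(t+t) by ring, ← List.range'_append_1, ← List.range'_append_1]
  simp [two_mul]

theorem pvInner (v : Nat → Int) (t a r c : Nat) (hc : c < 3) :
    ((((List.range (3*t)).map (fun k => (a*3 + k/t, v k))).filter
        (fun p => p.1 == r*3 + c)).map Prod.snd).sum
      = if a = r then ((List.range' (c*t) t).map v).sum else 0 := by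
  rw [pvRange_three]
  simp only [List.map_append, List.filter_append, List.sum_append]
  have h0 := pvKblock v t a 0 r c (by omega) hc
  have h1 := pvKblock v t a 1 r c (by omega) hc
  have h2 := pvKblock v t a 2 r c (by omega) hc
  simp only [zero_mul, one_mul] at h0 h1 h2
  rw [h0, h1, h2]
  interval_cases c <;> by_cases h : a = r <;> simp [h]

theorem pvOuter (v : Nat → Nat → Int) (t r c : Nat) (hr : r < 3) (hc : c < 3) :
    ((((List.range (3*t)).flatMap (fun i =>
          (List.range (3*t)).map (fun k => ((i/t)*3 + k/t, v i k)))).filter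
        (fun p => p.1 == r*3 + c)).map Prod.snd).sum
      = ((List.range' (r*t) t).map (fun i => ((List.range' (c*t) t).map (v i)).sum)).sum := by
  rw [pvSumFilterFlat]
  set G := fun i => ((((List.range (3*t)).map (fun k => ((i/t)*3 + k/t, v i k))).filter
      (fun p => p.1 == r*3 + c)).map Prod.snd).sum with hG
  rw [pvRange_three]
  simp only [List.map_append, List.sum_append]
  have hblock : ∀ a : Nat, (List.range' (a*t) t).map G
      = (List.range' (a*t) t).map (fun i =>
          if a = r then ((List.range' (c*t) t).map (v i)).sum else 0) := by
    intro a
    refine List.map_congr_left (fun i hi => ?_)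
    rw [hG]
    simp only
    rw [show i/t = a from pvDivBlock hi, pvInner (v i) t a r c hc]
  have b0 := hblock 0
  have b1 := hblock 1
  have b2 := hblock 2
  simp only [zero_mul, one_mul] at b0 b1 b2
  rw [b0, b1, b2]
  interval_cases r <;> simp

theorem pvFilter_sum (red_pixels_ : List (List Int)) (r c : Nat) (hr : r < 3) (hc : c < 3) :
    (((pvPairs red_pixels_).filter (fun p => p.1 == r*3 + c)).map Prod.snd).sum
      = pvQuad red_pixels_ r c := by
  unfold pvPairs pvQuad
  rw [pvOuter (fun i k => pvPix red_pixels_ (i : Int) (k : Int)) _ r c hr hc]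
  simp only [List.range'_eq_map_range, List.map_map]
  rfl

theorem pvFoldFlat {α β γ : Type} (g : α → List β) (f : γ → β → γ) (l : List α) :
    ∀ init, l.foldl (fun acc a => (g a).foldl f acc) init = (l.flatMap g).foldl f init := by
  induction l with
  | nil => intro init; simp
  | cons a l ih => intro init; simp [List.flatMap_cons, List.foldl_append, ih]

theorem pvFold_getElem? (ps : List (Nat × Int)) : ∀ (init : List Int) (j : Nat),
    (ps.foldl pvStep init)[j]? =
      init[j]?.map (fun x => x + ((ps.filter (fun p => p.1 == j)).map Prod.snd).sum) := by
  induction ps with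
  | nil => intro init j; simp
  | cons p ps ih =>
    intro init j
    rw [List.foldl_cons, ih]
    by_cases h : p.1 = j
    · cases hj : init[j]? <;> simp [pvStep, h, hj] <;> ring
    · cases hj : init[j]? <;> simp [pvStep, h, hj]

theorem pvAlt_eq_pairs (red_pixels_ : List (List Int)) :
    parse_region_alt red_pixels_ = (pvPairs red_pixels_).foldl pvStep (List.replicate 9 0) := by
  unfold parse_region_alt pvPairs
  rw [← pvFoldFlat]
  simp only [List.foldl_map, pvStep]

theorem pvAlt_eq_quads (red_pixels_ : List (List Int)) :
    parse_region_alt red_pixels_ =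
      [pvQuad red_pixels_ 0 0, pvQuad red_pixels_ 0 1, pvQuad red_pixels_ 0 2,
       pvQuad red_pixels_ 1 0, pvQuad red_pixels_ 1 1, pvQuad red_pixels_ 1 2,
       pvQuad red_pixels_ 2 0, pvQuad red_pixels_ 2 1, pvQuad red_pixels_ 2 2] := by
  apply List.ext_getElem?
  intro j
  rw [pvAlt_eq_pairs, pvFold_getElem?]
  have h00 := pvFilter_sum red_pixels_ 0 0 (by norm_num) (by norm_num)
  have h01 := pvFilter_sum red_pixels_ 0 1 (by norm_num) (by norm_num)
  have h02 := pvFilter_sum red_pixels_ 0 2 (by norm_num) (by norm_num)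
  have h10 := pvFilter_sum red_pixels_ 1 0 (by norm_num) (by norm_num)
  have h11 := pvFilter_sum red_pixels_ 1 1 (by norm_num) (by norm_num)
  have h12 := pvFilter_sum red_pixels_ 1 2 (by norm_num) (by norm_num)
  have h20 := pvFilter_sum red_pixels_ 2 0 (by norm_num) (by norm_num)
  have h21 := pvFilter_sum red_pixels_ 2 1 (by norm_num) (by norm_num)
  have h22 := pvFilter_sum red_pixels_ 2 2 (by norm_num) (by norm_num)
  norm_num at h00 h01 h02 h10 h11 h12 h20 h21 h22
  rcases j with _|_|_|_|_|_|_|_|_|j <;>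
    simp [h00, h01, h02, h10, h11, h12, h20, h21, h22]

theorem pvAquad (red_pixels_ : List (List Int)) (r c : Nat) (sc se : Int)
    (hsc : sc = ((r * (red_pixels_.length / 3) : Nat) : Int))
    (hse : se = ((c * (red_pixels_.length / 3) : Nat) : Int)) :
    (PySem.List.pyRange sc (sc + (red_pixels_.length : Int) / 3) 1).foldl (fun q i =>
        (PySem.List.pyRange se (se + (red_pixels_.length : Int) / 3) 1).foldl (fun q k =>
          q + pvPix red_pixels_ i k) q) 0
      = pvQuad red_pixels_ r c := by
  have hT : ((red_pixels_.length : Int)) / 3 = ((red_pixels_.length / 3 : Nat) : Int) := by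
    rw [Int.natCast_div]; norm_num
  set t := red_pixels_.length / 3 with ht
  rw [hT, hsc, hse]
  rw [PySem.List.pyRange_one, PySem.List.pyRange_one]
  have htn : (((r*t : Nat) : Int) + (t : Int) - ((r*t : Nat) : Int)).toNat = t := by omega
  have htn' : (((c*t : Nat) : Int) + (t : Int) - ((c*t : Nat) : Int)).toNat = t := by omega
  rw [htn, htn']
  rw [List.foldl_map]
  have hin : ∀ (x : Int) (a : Nat),
      List.foldl (fun q k => q + pvPix red_pixels_ (((r*t : Nat) : Int) + (a : Int)) k) x
        ((List.range t).map (fun k : Nat => ((c*t : Nat) : Int) + (k : Int)))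
      = x + ((List.range t).map (fun b => pvPix red_pixels_ ((r*t+a : Nat) : Int) ((c*t+b : Nat) : Int))).sum := by
    intro x a
    have hf : (fun (b : Nat) => pvPix red_pixels_ (((r*t : Nat) : Int) + (a : Int)) (((c*t : Nat) : Int) + (b : Int)))
        = (fun b => pvPix red_pixels_ ((r*t+a : Nat) : Int) ((c*t+b : Nat) : Int)) := by
      funext b; push_cast; rfl
    rw [List.foldl_map, PySem.List.foldl_add (List.range t)
      (fun b => pvPix red_pixels_ (((r*t : Nat) : Int) + (a : Int)) (((c*t : Nat) : Int) + (b : Int))) x, hf]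
  simp only [hin]
  rw [PySem.List.foldl_add, zero_add]
  rfl

theorem pvA_eq_quads (red_pixels_ : List (List Int)) :
    parse_region red_pixels_ =
      [pvQuad red_pixels_ 0 0, pvQuad red_pixels_ 0 1, pvQuad red_pixels_ 0 2,
       pvQuad red_pixels_ 1 0, pvQuad red_pixels_ 1 1, pvQuad red_pixels_ 1 2,
       pvQuad red_pixels_ 2 0, pvQuad red_pixels_ 2 1, pvQuad red_pixels_ 2 2] := by
  have hT : ((red_pixels_.length : Int)) / 3 = ((red_pixels_.length / 3 : Nat) : Int) := by
    rw [Int.natCast_div]; norm_num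
  unfold parse_region
  simp only [List.foldl_cons, List.foldl_nil, List.nil_append, List.cons_append]
  rw [pvAquad red_pixels_ 0 0 _ _ (by push_cast; ring) (by push_cast; ring),
      pvAquad red_pixels_ 0 1 _ _ (by push_cast; ring) (by rw [hT]; push_cast; ring),
      pvAquad red_pixels_ 0 2 _ _ (by push_cast; ring) (by rw [hT]; push_cast; ring),
      pvAquad red_pixels_ 1 0 _ _ (by rw [hT]; push_cast; ring) (by push_cast; ring),
      pvAquad red_pixels_ 1 1 _ _ (by rw [hT]; push_cast; ring) (by rw [hT]; push_cast; ring),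
      pvAquad red_pixels_ 1 2 _ _ (by rw [hT]; push_cast; ring) (by rw [hT]; push_cast; ring),
      pvAquad red_pixels_ 2 0 _ _ (by rw [hT]; push_cast; ring) (by push_cast; ring),
      pvAquad red_pixels_ 2 1 _ _ (by rw [hT]; push_cast; ring) (by rw [hT]; push_cast; ring),
      pvAquad red_pixels_ 2 2 _ _ (by rw [hT]; push_cast; ring) (by rw [hT]; push_cast; ring)]

-- ===== VERDICT (by name: the statement is the Claim_ definition above) =====
theorem parse_region_spec : Claim_equal_parse_region := by
  intro rp _ _
  unfold Spec_parse_region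
  rw [pvA_eq_quads, pvAlt_eq_quads]
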